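-- pv_equiv track=rewrite | github.com/douglascastrorj/metaheristicas | utils.py | createDecisionDict
-- ===== SOURCE A (Python) =====
-- def createDecisionDict(cirurgias, S, T, D, E):
--     x = {}
--     z = {}
--     for i in cirurgias:
--         x[i] = {}
--         for j in range(0, S):
--             x[i][j] = {}
--             for k in range(0, T):
--                 x[i][j][k] = {}
--                 for l in range(0,D):
--                     x[i][j][k][l] = 0
--
--
--         z[i] = 0
--
--     yesd = {}
--     for i in E:
--         yesd[i] = {}
--         for j in range(0, S):
--             yesd[i][j] = {}
--             for k in range(0, D):
--                 yesd[i][j][k] = 0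
--
--
--     return x, yesd, z
-- ===== SOURCE B (Python) =====
-- def createDecisionDict(cirurgias, S, T, D, E):
--     def build(dims):
--         if not dims:
--             return 0
--         head = dims[0]
--         rest = dims[1:]
--         return {k: build(rest) for k in head}
--
--     x = build([cirurgias, range(S), range(T), range(D)])
--     yesd = build([E, range(S), range(D)])
--     z = {i: 0 for i in cirurgias}
--     return x, yesd, z
-- ===== Notes on version B (the rewrite author's own statement) =====
-- stated objective: simpler
-- what changed: Replaces the four hand-nested loops with one recursive helper build(dims) that folds over a list of key-sources ({k: build(rest) for k in dims[0]}, base case 0), from which x, yesd and z are each one expression.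
import Mathlib
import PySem

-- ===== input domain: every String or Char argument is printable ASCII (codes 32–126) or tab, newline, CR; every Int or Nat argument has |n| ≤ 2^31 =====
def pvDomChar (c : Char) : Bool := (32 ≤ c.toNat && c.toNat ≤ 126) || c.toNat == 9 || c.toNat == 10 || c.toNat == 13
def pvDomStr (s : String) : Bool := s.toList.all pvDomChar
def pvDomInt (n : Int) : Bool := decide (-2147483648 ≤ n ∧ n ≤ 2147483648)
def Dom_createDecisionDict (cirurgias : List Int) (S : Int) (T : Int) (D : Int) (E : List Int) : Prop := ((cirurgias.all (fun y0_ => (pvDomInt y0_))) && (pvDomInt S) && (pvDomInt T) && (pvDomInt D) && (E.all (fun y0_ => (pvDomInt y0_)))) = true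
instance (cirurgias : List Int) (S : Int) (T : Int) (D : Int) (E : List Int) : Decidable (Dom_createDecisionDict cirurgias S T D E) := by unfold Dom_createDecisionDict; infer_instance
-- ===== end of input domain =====

-- B replaces A's four hand-nested loops by one generic level builder (simpler decomposition; same cost).
-- Each Python dict is rendered as its insertion-ordered association list (PySem.Dict.items).

-- ===== PORT A =====
-- literal transliteration: one loop over cirurgias filling x and z together, nested range loops, then the yesd loop
def createDecisionDict (cirurgias : List Int) (S : Int) (T : Int) (D : Int) (E : List Int) : (List (Int × List (Int × List (Int × List (Int × Int))))) × (List (Int × List (Int × List (Int × Int)))) × (List (Int × Int)) :=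
  let xz := cirurgias.foldl (fun p i =>
      let xi := (PySem.List.pyRange 0 S 1).foldl (fun dj j =>
          let xij := (PySem.List.pyRange 0 T 1).foldl (fun dk k =>
              let xijk := (PySem.List.pyRange 0 D 1).foldl (fun dl l =>
                  PySem.Dict.insert dl l (0 : Int)) PySem.Dict.empty
              PySem.Dict.insert dk k xijk.items) PySem.Dict.empty
          PySem.Dict.insert dj j xij.items) PySem.Dict.empty
      (PySem.Dict.insert p.1 i xi.items, PySem.Dict.insert p.2 i (0 : Int)))
    ((PySem.Dict.empty : PySem.Dict Int (List (Int × List (Int × List (Int × Int))))),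
     (PySem.Dict.empty : PySem.Dict Int Int))
  let yesd := E.foldl (fun di i =>
      let yi := (PySem.List.pyRange 0 S 1).foldl (fun dj j =>
          let yij := (PySem.List.pyRange 0 D 1).foldl (fun dk k =>
              PySem.Dict.insert dk k (0 : Int)) PySem.Dict.empty
          PySem.Dict.insert dj j yij.items) PySem.Dict.empty
      PySem.Dict.insert di i yi.items) PySem.Dict.empty
  (xz.1.items, yesd.items, xz.2.items)

-- ===== PORT B =====
-- B's helper build(dims): one dict level, {k: sub() for k in keys} (sub is the per-key recursive call build(rest))
def buildLevel {α : Type} (keys : List Int) (sub : Unit → α) : List (Int × α) :=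
  (keys.foldl (fun d k => PySem.Dict.insert d k (sub ())) PySem.Dict.empty).items

def createDecisionDict_alt (cirurgias : List Int) (S : Int) (T : Int) (D : Int) (E : List Int) : (List (Int × List (Int × List (Int × List (Int × Int))))) × (List (Int × List (Int × List (Int × Int)))) × (List (Int × Int)) :=
  (buildLevel cirurgias (fun _ => buildLevel (PySem.List.pyRange 0 S 1) (fun _ => buildLevel (PySem.List.pyRange 0 T 1) (fun _ => buildLevel (PySem.List.pyRange 0 D 1) (fun _ => (0 : Int))))),
   buildLevel E (fun _ => buildLevel (PySem.List.pyRange 0 S 1) (fun _ => buildLevel (PySem.List.pyRange 0 D 1) (fun _ => (0 : Int)))),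
   buildLevel cirurgias (fun _ => (0 : Int)))

-- ===== PRECONDITION & SPEC =====
def Spec_createDecisionDict (cirurgias : List Int) (S : Int) (T : Int) (D : Int) (E : List Int) (out : (List (Int × List (Int × List (Int × List (Int × Int))))) × (List (Int × List (Int × List (Int × Int)))) × (List (Int × Int))) : Prop := out = createDecisionDict_alt cirurgias S T D E
instance (cirurgias : List Int) (S : Int) (T : Int) (D : Int) (E : List Int) (out : (List (Int × List (Int × List (Int × List (Int × Int))))) × (List (Int × List (Int × List (Int × Int)))) × (List (Int × Int))) : Decidable (Spec_createDecisionDict cirurgias S T D E out) := by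
  unfold Spec_createDecisionDict
  -- instance search diverges on this deeply nested type; assemble the DecidableEq witness explicitly
  letI d1 : DecidableEq (Int × Int) := instDecidableEqProd
  letI d2 : DecidableEq (List (Int × Int)) := instDecidableEqList
  letI d3 : DecidableEq (Int × List (Int × Int)) := instDecidableEqProd
  letI d4 : DecidableEq (List (Int × List (Int × Int))) := instDecidableEqList
  letI d5 : DecidableEq (Int × List (Int × List (Int × Int))) := instDecidableEqProd
  letI d6 : DecidableEq (List (Int × List (Int × List (Int × Int)))) := instDecidableEqList
  letI d7 : DecidableEq (Int × List (Int × List (Int × List (Int × Int)))) := instDecidableEqProd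
  letI d8 : DecidableEq (List (Int × List (Int × List (Int × List (Int × Int))))) := instDecidableEqList
  exact decEq _ _

-- ===== CLAIM (what is proved, stated in full; the proofs are below) =====
def Claim_equal_createDecisionDict : Prop := ∀ (cirurgias : List Int) (S : Int) (T : Int) (D : Int) (E : List Int), Dom_createDecisionDict cirurgias S T D E → Spec_createDecisionDict cirurgias S T D E (createDecisionDict cirurgias S T D E)

-- ===== LEMMAS AND PROOFS =====

-- ===== VERDICT (by name: the statement is the Claim_ definition above) =====
theorem createDecisionDict_spec : Claim_equal_createDecisionDict := by
  intro cirurgias S T D E _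
  unfold Spec_createDecisionDict
  -- zeta/delta-reduced statement of the goal: A\'s paired x/z loop on the left
  show ((cirurgias.foldl
          (fun (p : PySem.Dict Int (List (Int × List (Int × List (Int × Int)))) × PySem.Dict Int Int) (i : Int) =>
            ((fun (d : PySem.Dict Int (List (Int × List (Int × List (Int × Int))))) (i : Int) => d.insert i (buildLevel (PySem.List.pyRange 0 S 1) (fun _ => buildLevel (PySem.List.pyRange 0 T 1) (fun _ => buildLevel (PySem.List.pyRange 0 D 1) (fun _ => (0 : Int)))))) p.1 i, (fun (d : PySem.Dict Int Int) (i : Int) => d.insert i (0 : Int)) p.2 i))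
          (PySem.Dict.empty, PySem.Dict.empty)).1.items,
        buildLevel E (fun _ => buildLevel (PySem.List.pyRange 0 S 1) (fun _ => buildLevel (PySem.List.pyRange 0 D 1) (fun _ => (0 : Int)))),
        (cirurgias.foldl
          (fun (p : PySem.Dict Int (List (Int × List (Int × List (Int × Int)))) × PySem.Dict Int Int) (i : Int) =>
            ((fun (d : PySem.Dict Int (List (Int × List (Int × List (Int × Int))))) (i : Int) => d.insert i (buildLevel (PySem.List.pyRange 0 S 1) (fun _ => buildLevel (PySem.List.pyRange 0 T 1) (fun _ => buildLevel (PySem.List.pyRange 0 D 1) (fun _ => (0 : Int)))))) p.1 i, (fun (d : PySem.Dict Int Int) (i : Int) => d.insert i (0 : Int)) p.2 i))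
          (PySem.Dict.empty, PySem.Dict.empty)).2.items)
      = createDecisionDict_alt cirurgias S T D E
  rw [PySem.List.foldl_prod_mk (f := (fun (d : PySem.Dict Int (List (Int × List (Int × List (Int × Int))))) (i : Int) => d.insert i (buildLevel (PySem.List.pyRange 0 S 1) (fun _ => buildLevel (PySem.List.pyRange 0 T 1) (fun _ => buildLevel (PySem.List.pyRange 0 D 1) (fun _ => (0 : Int))))))) (g := (fun (d : PySem.Dict Int Int) (i : Int) => d.insert i (0 : Int)))]
  rfl
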